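-- pv_equiv track=rewrite | github.com/sousatg/piglatin | piglatin/piglatin.py | translate_word_started_with_consonante
-- ===== SOURCE A (Python) =====
-- def hasVowel(el):
--     return el in "AEIOUaeiou"
--
-- def hasY(el):
--     return el in "Yy"
--
-- def translate_word_started_with_consonante(sWord):
--     sSuffix = ''
--     sFirst = sWord[0]
--
--     if sWord != sWord.upper():
--         sFirst = sFirst.lower()
--
--     for i in range(len(sWord)):
--         sSuffix += sFirst
--         sLast = sFirst
--
--         isCapitalized = sFirst.isupper()
--
--         sWord = sWord[1:]
--
--         if len(sWord) > 0:
--             sFirst = sWord[0]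
--
--         if (hasVowel(sFirst) or hasY(sFirst)) and (sLast not in "qQ" or sFirst not in "uU"):
--             break
--
--     if (isCapitalized):
--         sSuffix += 'ay'.upper()
--     else:
--         sSuffix += 'ay'
--
--     return sWord + sSuffix
-- ===== SOURCE B (Python) =====
-- def translate_word_started_with_consonante(sWord):
--     first = sWord[0]
--     if sWord != sWord.upper():
--         first = first.lower()
--     n = len(sWord)
--     k = 1
--     while k < n:
--         c = sWord[k]
--         if c in "AEIOUaeiouYy" and not (sWord[k - 1] in "qQ" and c in "uU"):
--             break
--         k += 1
--     suffix = first + sWord[1:k]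
--     tail = "AY" if suffix[-1].isupper() else "ay"
--     return sWord[k:] + suffix + tail
-- ===== Notes on version B (the rewrite author's own statement) =====
-- stated objective: faster
-- what changed: B replaces A's loop that repeatedly re-slices the word (sWord = sWord[1:]) and grows the suffix char by char with a single index scan that finds the vowel/y boundary (with the qu exception) and then slices once.
import Mathlib
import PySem

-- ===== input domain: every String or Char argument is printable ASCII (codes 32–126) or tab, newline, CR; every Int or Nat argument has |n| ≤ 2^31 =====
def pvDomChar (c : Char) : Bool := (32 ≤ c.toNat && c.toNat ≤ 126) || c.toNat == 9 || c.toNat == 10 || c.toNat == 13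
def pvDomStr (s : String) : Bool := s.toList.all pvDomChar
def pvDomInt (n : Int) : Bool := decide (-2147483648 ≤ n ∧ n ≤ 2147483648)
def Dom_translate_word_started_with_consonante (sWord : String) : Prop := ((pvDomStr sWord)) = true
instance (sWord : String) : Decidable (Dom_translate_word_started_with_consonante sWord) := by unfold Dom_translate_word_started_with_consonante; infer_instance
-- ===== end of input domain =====

-- B replaces A's loop that re-slices the word each iteration by a single index scan for the
-- vowel/y boundary (with the qu exception) followed by one slice.

-- ===== PORT A =====
def pvHasVowel (el : Char) : Bool := "AEIOUaeiou".toList.contains el   -- el in "AEIOUaeiou"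

def pvHasY (el : Char) : Bool := "Yy".toList.contains el   -- el in "Yy"

-- A's for-loop: fuel = remaining iterations of range(len(sWord));
-- state (sWord, sSuffix, sFirst, isCapitalized); returns (sWord, sSuffix, isCapitalized)
def pvALoop : Nat → List Char → List Char → Char → Bool → (List Char × List Char × Bool)
  | 0, w, suf, _, cap => (w, suf, cap)   -- range exhausted
  | i + 1, w, suf, f, _cap =>
    let suf' := suf ++ [f]                       -- sSuffix += sFirst
    let last := f                                -- sLast = sFirst
    let cap' := PySem.Chars.isupper f            -- isCapitalized = sFirst.isupper() (one-char string: exact)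
    let w' := PySem.List.slice w (some 1) none   -- sWord = sWord[1:]
    let f' := if w'.length > 0 then PySem.List.pyGetD w' 0 f else f   -- if len(sWord) > 0: sFirst = sWord[0]
    if (pvHasVowel f' || pvHasY f') && (!("qQ".toList.contains last) || !("uU".toList.contains f')) then
      (w', suf', cap')
    else
      pvALoop i w' suf' f' cap'

def translate_word_started_with_consonante (sWord : String) : String :=
  let w := sWord.toList
  let f0 := PySem.List.pyGetD w 0 ' '            -- sFirst = sWord[0]; IndexError on "" (excluded by Pre_)
  let f := if PySem.Chars.upper w ≠ w then PySem.Chars.lowerChar f0 else f0  -- if sWord != sWord.upper(): sFirst = sFirst.lower()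
  let r := pvALoop w.length w [] f false         -- isCapitalized first assigned in the loop, which runs ≥ 1 time under Pre_
  let tail := if r.2.2 then "AY".toList else "ay".toList    -- 'ay'.upper() / 'ay'
  String.ofList (r.1 ++ r.2.1 ++ tail)           -- return sWord + sSuffix

-- ===== PORT B =====
-- B's while-loop: scan k upward while k < n, stopping at the vowel/y boundary
def pvBLoop (w : List Char) (k : Nat) : Nat :=
  if _h : k < w.length then
    let c := PySem.List.pyGetD w (k : Int) ' '            -- c = sWord[k], in range
    if "AEIOUaeiouYy".toList.contains c &&
        !("qQ".toList.contains (PySem.List.pyGetD w ((k : Int) - 1) ' ') &&   -- sWord[k-1], in range (k ≥ 1)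
          "uU".toList.contains c) then
      k
    else
      pvBLoop w (k + 1)
  else k
termination_by w.length - k

def translate_word_started_with_consonante_alt (sWord : String) : String :=
  let w := sWord.toList
  let f0 := PySem.List.pyGetD w 0 ' '            -- first = sWord[0]; IndexError on "" (excluded by Pre_)
  let first := if PySem.Chars.upper w ≠ w then PySem.Chars.lowerChar f0 else f0
  let k := pvBLoop w 1
  let suffix := first :: PySem.List.slice w (some 1) (some (k : Int))   -- suffix = first + sWord[1:k]
  let tail := if PySem.Chars.isupper (PySem.List.pyGetD suffix (-1) ' ') then "AY".toList else "ay".toList  -- suffix[-1].isupper()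
  String.ofList (PySem.List.slice w (some (k : Int)) none ++ suffix ++ tail)  -- return sWord[k:] + suffix + tail

-- ===== PRECONDITION & SPEC =====
-- Pre_ excludes only the empty string, on which A raises IndexError at sWord[0].
def Pre_translate_word_started_with_consonante (sWord : String) : Prop := sWord ≠ ""
instance (sWord : String) : Decidable (Pre_translate_word_started_with_consonante sWord) := by
  unfold Pre_translate_word_started_with_consonante; infer_instance

def pvWitness_translate_word_started_with_consonante : String := "school"

def Spec_translate_word_started_with_consonante (sWord : String) (out : String) : Prop :=
  out = translate_word_started_with_consonante_alt sWord
instance (sWord : String) (out : String) : Decidable (Spec_translate_word_started_with_consonante sWord out) := by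
  unfold Spec_translate_word_started_with_consonante; infer_instance

-- ===== CLAIM (what is proved, stated in full; the proofs are below) =====
def Claim_equal_translate_word_started_with_consonante : Prop :=
  ∀ (sWord : String), Dom_translate_word_started_with_consonante sWord →
    Pre_translate_word_started_with_consonante sWord →
    Spec_translate_word_started_with_consonante sWord (translate_word_started_with_consonante sWord)

-- ===== LEMMAS AND PROOFS =====

-- the stop condition shared by both loops (A's phrasing)
def pvC (prev c : Char) : Bool :=
  (pvHasVowel c || pvHasY c) && (!("qQ".toList.contains prev) || !("uU".toList.contains c))

-- B's phrasing of the stop condition equals A's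
lemma pvC_b_eq (prev c : Char) :
    ("AEIOUaeiouYy".toList.contains c && !("qQ".toList.contains prev && "uU".toList.contains c))
      = pvC prev c := by
  have h : "AEIOUaeiouYy".toList.contains c = (pvHasVowel c || pvHasY c) := by
    simp only [pvHasVowel, pvHasY, List.contains_eq_mem]
    show decide (c ∈ ['A','E','I','O','U','a','e','i','o','u','Y','y']) = _
    simp only [List.mem_cons, List.not_mem_nil, or_false]
    by_cases h1 : c = 'Y' <;> by_cases h2 : c = 'y' <;>
      simp [h1, h2]
  rw [pvC, h, Bool.not_and]

-- number of characters moved: scan t with prev at the head, stop (value 1) where the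
-- condition fires, else move on
def pvK (prev : Char) : List Char → Nat
  | [] => 1
  | c :: rest => if pvC prev c then 1 else 1 + pvK c rest

lemma pvK_pos (p : Char) (t : List Char) : 1 ≤ pvK p t := by
  cases t with
  | nil => simp [pvK]
  | cons c rest => simp only [pvK]; split <;> omega

lemma pvK_le (p : Char) (t : List Char) : pvK p t ≤ t.length + 1 := by
  induction t generalizing p with
  | nil => simp [pvK]
  | cons c rest ih =>
    simp only [pvK, List.length_cons]
    split
    · omega
    · have := ih c; omega

-- A's loop, characterised by pvK
lemma pvALoop_spec (t : List Char) : ∀ (x f : Char) (suf : List Char) (cap : Bool),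
    pvALoop (t.length + 1) (x :: t) suf f cap =
      (t.drop (pvK f t - 1), suf ++ (f :: t).take (pvK f t),
        PySem.Chars.isupper ((f :: t).getD (pvK f t - 1) ' ')) := by
  induction t with
  | nil =>
    intro x f suf cap
    simp only [List.length_nil, pvALoop, PySem.List.slice_from_one, List.tail_cons,
      List.length_nil, gt_iff_lt, Nat.lt_irrefl, if_false, pvK]
    split <;> simp
  | cons c rest ih =>
    intro x f suf cap
    have hfuel : (c :: rest).length + 1 = (rest.length + 1) + 1 := by simp
    rw [hfuel, pvALoop]
    simp only [PySem.List.slice_from_one, List.tail_cons, List.length_cons,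
      gt_iff_lt, Nat.zero_lt_succ, if_true, PySem.List.pyGetD_zero_cons]
    have hc : ((pvHasVowel c || pvHasY c) &&
        (!("qQ".toList.contains f) || !("uU".toList.contains c))) = pvC f c := rfl
    rw [hc]
    by_cases h : pvC f c = true
    · rw [if_pos h]
      simp [pvK, h]
    · rw [if_neg (by simp [h]), ih c c (suf ++ [f]) (PySem.Chars.isupper f)]
      have hm := pvK_pos c rest
      obtain ⟨m, hm'⟩ : ∃ m, pvK c rest = m + 1 := ⟨pvK c rest - 1, by omega⟩
      simp only [pvK, h, Bool.false_eq_true, if_false, hm']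
      have h1 : 1 + (m + 1) - 1 = m + 1 := by omega
      simp only [h1, Nat.add_sub_cancel, List.drop_succ_cons, List.getD_cons_succ,
        Prod.mk.injEq]
      refine ⟨trivial, ?_, trivial⟩
      rw [show 1 + (m + 1) = (m + 1) + 1 by omega, List.take_succ_cons, List.append_assoc]
      rfl

-- B's loop, characterised by pvK
lemma pvBLoop_spec (w : List Char) : ∀ (n k : Nat), w.length - k = n → 1 ≤ k → k ≤ w.length →
    pvBLoop w k = k - 1 + pvK (w.getD (k - 1) ' ') (w.drop k) := by
  intro n
  induction n with
  | zero =>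
    intro k hn h1 h2
    have hk : k = w.length := by omega
    rw [pvBLoop, dif_neg (by omega)]
    simp [hk, List.drop_length, pvK]
    omega
  | succ m ih =>
    intro k hn h1 h2
    have hk : k < w.length := by omega
    rw [pvBLoop, dif_pos hk]
    have hcast : ((k : Int) - 1) = ((k - 1 : Nat) : Int) := by omega
    simp only [hcast, PySem.List.pyGetD_natCast]
    have hdrop : w.drop k = w[k] :: w.drop (k + 1) := List.drop_eq_getElem_cons hk
    have hgd : w.getD k ' ' = w[k] := List.getD_eq_getElem w ' ' hk
    rw [hdrop, pvK, hgd, pvC_b_eq]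
    by_cases h : pvC (w.getD (k - 1) ' ') w[k] = true
    · rw [if_pos h, if_pos h]
      omega
    · rw [if_neg h, if_neg h]
      rw [ih (k + 1) (by omega) (by omega) (by omega)]
      have : w.getD (k + 1 - 1) ' ' = w[k] := by
        simpa using List.getD_eq_getElem w ' ' hk
      rw [this]
      generalize pvK w[k] (List.drop (k + 1) w) = z
      omega

-- lowering the first character does not change whether it is a q
lemma pvLower_qQ (x : Char) :
    "qQ".toList.contains (PySem.Chars.lowerChar x) = "qQ".toList.contains x := by
  by_cases hq : x = 'q'
  · subst hq; decide
  by_cases hQ : x = 'Q'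
  · subst hQ; decide
  have hlist : "qQ".toList = ['q', 'Q'] := rfl
  have hx : "qQ".toList.contains x = false := by
    rw [hlist, List.contains_eq_mem]
    simp only [List.mem_cons, List.not_mem_nil, or_false, decide_eq_false_iff_not]
    tauto
  rw [hx, hlist, List.contains_eq_mem]
  simp only [List.mem_cons, List.not_mem_nil, or_false, decide_eq_false_iff_not]
  unfold PySem.Chars.lowerChar
  split_ifs with hu
  · have hiu : 'A' ≤ x ∧ x ≤ 'Z' := by
      unfold PySem.Chars.isupper at hu; simpa using hu
    have h65 : 65 ≤ x.toNat := by
      have := hiu.1; rw [Char.le_def, UInt32.le_iff_toNat_le] at this; exact this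
    have h90 : x.toNat ≤ 90 := by
      have := hiu.2; rw [Char.le_def, UInt32.le_iff_toNat_le] at this; exact this
    have hval : (x.toNat + 32).isValidChar := Or.inl (by omega)
    have htn : (Char.ofNat (x.toNat + 32)).toNat = x.toNat + 32 := by
      rw [Char.toNat_ofNat, if_pos hval]
    rintro (h | h)
    · have h113 : (Char.ofNat (x.toNat + 32)).toNat = 113 := by rw [h]; rfl
      have h81 : x.toNat = 81 := by omega
      exact hQ (Char.ext (UInt32.toNat_inj.mp (by exact h81)))
    · have h81' : (Char.ofNat (x.toNat + 32)).toNat = 81 := by rw [h]; rfl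
      omega
  · rintro (h | h)
    · exact hq h
    · exact hQ h

-- pvK only looks at the head character through the q-test
lemma pvK_lower (x : Char) (t : List Char) : pvK (PySem.Chars.lowerChar x) t = pvK x t := by
  cases t with
  | nil => rfl
  | cons c rest =>
    have hcond : pvC (PySem.Chars.lowerChar x) c = pvC x c := by
      unfold pvC; rw [pvLower_qQ]
    simp only [pvK, hcond]

-- getLast of a prefix, as getD
lemma pvGetLast_take (l : List Char) (K : Nat) (h1 : 1 ≤ K) (h2 : K ≤ l.length)
    (hne : l.take K ≠ []) : (l.take K).getLast hne = l.getD (K - 1) ' ' := by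
  have hlen : (l.take K).length = K := by simp [List.length_take]; omega
  rw [List.getLast_eq_getElem hne]
  simp only [List.getElem_take, hlen]
  rw [List.getD_eq_getElem l ' ' (by omega)]

-- getLast respects equality of the lists
lemma pvGetLast_congr {l1 l2 : List Char} (h : l1 = l2) (h1 : l1 ≠ []) :
    l1.getLast h1 = l2.getLast (h ▸ h1) := by subst h; rfl

-- ===== VERDICT (by name: the statement is the Claim_ definition above) =====
theorem translate_word_started_with_consonante_spec : Claim_equal_translate_word_started_with_consonante := by
  unfold Claim_equal_translate_word_started_with_consonante
  intro s _hd hp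
  unfold Spec_translate_word_started_with_consonante
  unfold translate_word_started_with_consonante translate_word_started_with_consonante_alt
  cases hw : s.toList with
  | nil =>
    exact absurd (by rwa [← String.toList_eq_nil_iff]) hp
  | cons x t =>
    simp only [PySem.List.pyGetD_zero_cons, List.length_cons]
    set f := if PySem.Chars.upper (x :: t) ≠ x :: t then PySem.Chars.lowerChar x else x with hf
    have hKf : pvK f t = pvK x t := by
      rw [hf]; split
      · exact pvK_lower x t
      · rfl
    have hKB : pvBLoop (x :: t) 1 = pvK f t := by
      rw [pvBLoop_spec (x :: t) ((x :: t).length - 1) 1 rfl (by omega) (by simp)]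
      simp [hKf]
    set K := pvK f t with hKdef
    have hK1 : 1 ≤ K := pvK_pos f t
    have hK2 : K ≤ t.length + 1 := pvK_le f t
    rw [pvALoop_spec t x f [] false, hKB]
    obtain ⟨K', hKK⟩ : ∃ K', K = K' + 1 := ⟨K - 1, by omega⟩
    have hsl1 : PySem.List.slice (x :: t) (some (K : Int)) none = t.drop (K - 1) := by
      rw [PySem.List.slice_from_natCast, hKK]
      simp
    have hsl2 : PySem.List.slice (x :: t) (some 1) (some (K : Int)) = t.take (K - 1) := by
      have h := PySem.List.slice_natCast (x :: t) 1 K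
      norm_num at h
      rw [h]
    have hsuffix : f :: t.take (K - 1) = (f :: t).take K := by
      rw [hKK]
      simp [List.take_succ_cons]
    have hlast : PySem.List.pyGetD (f :: t.take (K - 1)) (-1) ' ' = (f :: t).getD (K - 1) ' ' := by
      rw [PySem.List.pyGetD_neg_one _ _ (by simp), pvGetLast_congr hsuffix]
      all_goals exact pvGetLast_take (f :: t) K hK1 (by simp only [List.length_cons]; omega) _
    simp only [hsl1, hsl2]
    rw [hlast]
    simp only [hsuffix, List.nil_append, ← hKdef]
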